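-- pv_equiv track=rewrite | github.com/liaochris/oss_hierarchy | source/scrape/collect_commits/docs/get_commit_data_helpers.py | createCommitGroupPush
-- ===== SOURCE A (Python) =====
-- def createCommitGroupPush(push_before, push_head, commit_list, commit_list_length):
--     try:
--         if commit_list_length == 1:
--             return [[push_before, push_head]]
--         else:
--             avail_commits = len(commit_list)
--             lst_result = [[push_before, commit_list[0].split("/")[-1]]]
--             for i in range(avail_commits-1):
--                 lst_result.append([commit_list[i].split("/")[-1], commit_list[i+1].split("/")[-1]])
--             return lst_result
--     except:
--         return [[]]
-- ===== SOURCE B (Python) =====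
-- def createCommitGroupPush(push_before, push_head, commit_list, commit_list_length):
--     if commit_list_length == 1:
--         return [[push_before, push_head]]
--     # single pass carrying the previous endpoint: no indexing, no special-cased
--     # first pair, and each commit's tail is split exactly once
--     result = []
--     prev = push_before
--     for commit in commit_list:
--         tail = commit.split("/")[-1]
--         result.append([prev, tail])
--         prev = tail
--     return result
-- ===== Notes on version B (the rewrite author's own statement) =====
-- stated objective: alternative
-- what changed: B replaces A's index loop (special-cased first pair, commit_list[i]/commit_list[i+1] with each tail split twice) by a single pass that carries the previous endpoint in a state variable, computing each tail exactly once and never indexing.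
-- intended difference: On an empty commit_list with commit_list_length != 1, A's bare except turns the IndexError from commit_list[0] into the sentinel [[]], while B returns [] (no commits, no pairs), the natural value for an empty group. — e.g. on createCommitGroupPush("b", "h", [], 0): A returns [[]], B returns []
import Mathlib
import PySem

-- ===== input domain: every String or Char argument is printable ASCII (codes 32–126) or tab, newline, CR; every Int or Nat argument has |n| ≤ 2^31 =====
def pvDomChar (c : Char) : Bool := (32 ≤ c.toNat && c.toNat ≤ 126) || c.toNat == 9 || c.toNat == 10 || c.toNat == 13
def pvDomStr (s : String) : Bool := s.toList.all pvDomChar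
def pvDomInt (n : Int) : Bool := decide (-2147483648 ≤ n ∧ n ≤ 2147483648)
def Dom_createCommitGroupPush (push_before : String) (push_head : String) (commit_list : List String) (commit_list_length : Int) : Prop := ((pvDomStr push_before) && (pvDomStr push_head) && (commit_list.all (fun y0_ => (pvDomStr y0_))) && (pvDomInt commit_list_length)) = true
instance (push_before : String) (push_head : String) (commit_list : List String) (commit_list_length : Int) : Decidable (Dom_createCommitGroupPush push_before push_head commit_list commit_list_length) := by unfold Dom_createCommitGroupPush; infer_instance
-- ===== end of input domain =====

-- B replaces A's index loop by a single pass carrying the previous endpoint in a state variable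
-- (alternative decomposition, each tail computed once, no indexing); on empty commit_list with
-- length ≠ 1 B returns [] where A's bare except returns the sentinel [[]] (see D_ below).

-- s.split("/")[-1]  (split? is some since "/" ≠ ""; the result list is never empty)
def pvTail (c : String) : String :=
  PySem.List.pyGetD ((PySem.Str.split? c "/").getD []) (-1) ""

-- ===== PORT A =====
def createCommitGroupPush (push_before : String) (push_head : String) (commit_list : List String) (commit_list_length : Int) : List (List String) :=
  if commit_list_length = 1 then [[push_before, push_head]]
  else
    match PySem.List.pyGet? commit_list 0 with
    | none => [[]]   -- commit_list[0] raises IndexError; the bare except returns [[]]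
    | some c0 =>
      let availCommits : Int := commit_list.length
      let init := [[push_before, pvTail c0]]
      (PySem.List.pyRange 0 (availCommits - 1) 1).foldl
        (fun acc i =>
          acc ++ [[pvTail (PySem.List.pyGetD commit_list i ""),
                   pvTail (PySem.List.pyGetD commit_list (i + 1) "")]]) init

-- ===== PORT B =====
def createCommitGroupPush_alt (push_before : String) (push_head : String) (commit_list : List String) (commit_list_length : Int) : List (List String) :=
  if commit_list_length = 1 then [[push_before, push_head]]
  else
    (commit_list.foldl
      (fun (st : List (List String) × String) commit =>
        let tail := pvTail commit
        (st.1 ++ [[st.2, tail]], tail))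
      ([], push_before)).1

-- ===== PRECONDITION & SPEC =====
-- On an empty commit_list with commit_list_length ≠ 1, A's bare except turns the IndexError from
-- commit_list[0] into the sentinel [[]], while B returns [] (no commits, no pairs), the natural
-- value for an empty group.
def D_createCommitGroupPush (push_before : String) (push_head : String) (commit_list : List String) (commit_list_length : Int) : Prop :=
  commit_list = [] ∧ commit_list_length ≠ 1
instance (push_before : String) (push_head : String) (commit_list : List String) (commit_list_length : Int) : Decidable (D_createCommitGroupPush push_before push_head commit_list commit_list_length) := by unfold D_createCommitGroupPush; infer_instance

def Spec_createCommitGroupPush (push_before : String) (push_head : String) (commit_list : List String) (commit_list_length : Int) (out : List (List String)) : Prop := ¬ D_createCommitGroupPush push_before push_head commit_list commit_list_length → out = createCommitGroupPush_alt push_before push_head commit_list commit_list_length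
instance (push_before : String) (push_head : String) (commit_list : List String) (commit_list_length : Int) (out : List (List String)) : Decidable (Spec_createCommitGroupPush push_before push_head commit_list commit_list_length out) := by unfold Spec_createCommitGroupPush; infer_instance

def pvDiffWitness_createCommitGroupPush : String × String × List String × Int := ("b", "h", [], 0)
def pvDiffWitnessOut_createCommitGroupPush : (List (List String)) × (List (List String)) := ([[]], [])

-- ===== CLAIM =====
def Claim_unchanged_createCommitGroupPush : Prop := ∀ (push_before : String) (push_head : String) (commit_list : List String) (commit_list_length : Int), Dom_createCommitGroupPush push_before push_head commit_list commit_list_length → Spec_createCommitGroupPush push_before push_head commit_list commit_list_length (createCommitGroupPush push_before push_head commit_list commit_list_length)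
def Claim_changed_createCommitGroupPush : Prop := Dom_createCommitGroupPush (pvDiffWitness_createCommitGroupPush.1) (pvDiffWitness_createCommitGroupPush.2.1) (pvDiffWitness_createCommitGroupPush.2.2.1) (pvDiffWitness_createCommitGroupPush.2.2.2) ∧ D_createCommitGroupPush (pvDiffWitness_createCommitGroupPush.1) (pvDiffWitness_createCommitGroupPush.2.1) (pvDiffWitness_createCommitGroupPush.2.2.1) (pvDiffWitness_createCommitGroupPush.2.2.2) ∧ createCommitGroupPush (pvDiffWitness_createCommitGroupPush.1) (pvDiffWitness_createCommitGroupPush.2.1) (pvDiffWitness_createCommitGroupPush.2.2.1) (pvDiffWitness_createCommitGroupPush.2.2.2) = pvDiffWitnessOut_createCommitGroupPush.1 ∧ createCommitGroupPush_alt (pvDiffWitness_createCommitGroupPush.1) (pvDiffWitness_createCommitGroupPush.2.1) (pvDiffWitness_createCommitGroupPush.2.2.1) (pvDiffWitness_createCommitGroupPush.2.2.2) = pvDiffWitnessOut_createCommitGroupPush.2 ∧ pvDiffWitnessOut_createCommitGroupPush.1 ≠ pvDiffWitnessOut_createCommitGroupPush.2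
def Claim_exact_createCommitGroupPush : Prop := ∀ (push_before : String) (push_head : String) (commit_list : List String) (commit_list_length : Int), Dom_createCommitGroupPush push_before push_head commit_list commit_list_length → D_createCommitGroupPush push_before push_head commit_list commit_list_length → createCommitGroupPush push_before push_head commit_list commit_list_length ≠ createCommitGroupPush_alt push_before push_head commit_list commit_list_length

-- ===== LEMMAS AND PROOFS =====

-- proof helper: B's fold, written as a recursion carrying the previous endpoint
def pvChain (prev : String) : List String → List (List String)
  | [] => []
  | c :: rest =>
    let tail := pvTail c
    [[prev, tail]] ++ pvChain tail rest

theorem foldl_eq_chain (l : List String) : ∀ (acc : List (List String)) (prev : String),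
    (l.foldl
      (fun (st : List (List String) × String) commit =>
        let tail := pvTail commit
        (st.1 ++ [[st.2, tail]], tail))
      (acc, prev)).1 = acc ++ pvChain prev l := by
  induction l with
  | nil => intro acc prev; simp [pvChain]
  | cons c rest ih =>
    intro acc prev
    rw [List.foldl_cons]
    dsimp only
    rw [ih, pvChain]
    simp

-- A's loop as a map over List.range of consecutive getD pairs of pb :: tails
theorem pv_else (pb c0 : String) (rest : List String) :
    (PySem.List.pyRange 0 (((c0 :: rest).length : Int) - 1) 1).foldl
      (fun acc i =>
        acc ++ [[pvTail (PySem.List.pyGetD (c0 :: rest) i ""),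
                 pvTail (PySem.List.pyGetD (c0 :: rest) (i + 1) "")]])
      [[pb, pvTail c0]]
    = (List.range ((pb :: (c0 :: rest).map pvTail).length - 1)).map
        (fun i => [(pb :: (c0 :: rest).map pvTail).getD i "",
                   (pb :: (c0 :: rest).map pvTail).getD (i + 1) ""]) := by
  rw [PySem.List.foldl_append_singleton_eq_map]
  have hlen : ((c0 :: rest).length : Int) - 1 = (rest.length : Int) := by
    simp
  rw [hlen, PySem.List.pyRange_zero_nat]
  simp only [List.map_map, List.length_cons, List.length_map, Nat.add_sub_cancel,
    List.range_succ_eq_map, List.map_cons, List.map_map]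
  have hstep : ∀ k, k < rest.length →
      [pvTail (PySem.List.pyGetD (c0 :: rest) (k : Int) ""),
       pvTail (PySem.List.pyGetD (c0 :: rest) ((k : Int) + 1) "")]
      = [(pb :: pvTail c0 :: List.map pvTail rest).getD (k + 1) "",
         (pb :: pvTail c0 :: List.map pvTail rest).getD (k + 1 + 1) ""] := by
    intro k hk
    have h1 : k < (c0 :: rest).length := by simp; omega
    have hc : ((k : Int) + 1) = ((k + 1 : Nat) : Int) := by push_cast; ring
    simp only [hc, PySem.List.pyGetD_natCast, List.getD_cons_succ]
    rw [List.getD_eq_getElem _ _ h1, List.getD_eq_getElem _ _ hk,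
        List.getD_eq_getElem _ _ (by simpa using h1),
        List.getD_eq_getElem _ _ (by simpa using hk)]
    simp [← List.map_cons]
  rw [List.singleton_append]
  congr 1
  apply List.map_congr_left
  intro k hk
  rw [List.mem_range] at hk
  simp only [Function.comp_apply, Nat.succ_eq_add_one]
  exact hstep k hk

-- the consecutive-pair view of pb :: tails equals B's carried-endpoint recursion
theorem range_map_eq_chain (l : List String) : ∀ (pb : String),
    (List.range l.length).map
      (fun i => [(pb :: l.map pvTail).getD i "", (pb :: l.map pvTail).getD (i + 1) ""])
    = pvChain pb l := by
  induction l with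
  | nil => intro pb; simp [pvChain]
  | cons c rest ih =>
    intro pb
    simp only [List.length_cons, List.range_succ_eq_map, List.map_cons, List.map_map,
      List.getD_cons_zero, List.getD_cons_succ]
    rw [pvChain]
    simp only [List.singleton_append]
    congr 1
    rw [← ih (pvTail c)]
    apply List.map_congr_left
    intro k hk
    simp [List.getD_cons_succ]

-- ===== VERDICT =====
theorem createCommitGroupPush_spec : Claim_unchanged_createCommitGroupPush := by
  intro pb ph cl n _ hnD
  unfold createCommitGroupPush createCommitGroupPush_alt
  by_cases h1 : n = 1
  · simp [h1]
  · rw [if_neg h1, if_neg h1]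
    match cl, hnD with
    | [], hnD => exact absurd ⟨rfl, h1⟩ hnD
    | c0 :: rest, _ =>
      rw [PySem.List.pyGet?_zero_cons]
      dsimp only
      rw [pv_else pb c0 rest]
      have : (pb :: (c0 :: rest).map pvTail).length - 1 = (c0 :: rest).length := by simp
      rw [this]
      rw [range_map_eq_chain (c0 :: rest) pb, foldl_eq_chain]
      simp

theorem createCommitGroupPush_changed : Claim_changed_createCommitGroupPush := by
  unfold Claim_changed_createCommitGroupPush; decide

theorem createCommitGroupPush_tight : Claim_exact_createCommitGroupPush := by
  intro pb ph cl n _ hD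
  obtain ⟨hnil, h1⟩ := hD
  subst hnil
  simp [createCommitGroupPush, createCommitGroupPush_alt, if_neg h1, PySem.List.pyGet?]
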